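-- pv_equiv track=rewrite | github.com/jasgrg/adventofcode | 2023/day12/part1.py | does_pattern_conform
-- ===== SOURCE A (Python) =====
-- def does_pattern_conform(pattern, counts):
--     seqs = []
--     seq = 0
--     for l in pattern:
--         if l == '.':
--             if seq > 0:
--                 seqs.append(seq)
--             seq = 0
--         else:
--             seq += 1
--     if seq != 0:
--         seqs.append(seq)
--     if len(seqs) != len(counts):
--         return False
--     for s_indx, s in enumerate(seqs):
--         if seqs[s_indx] != counts[s_indx]:
--             return False
--     return True
-- ===== SOURCE B (Python) =====
-- def does_pattern_conform(pattern, counts):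
--     # Stream the runs against counts directly: keep an index into counts and a
--     # pending run length; fail fast on the first mismatch; no run list is built.
--     k = 0
--     run = 0
--     for c in pattern:
--         if c != '.':
--             run += 1
--         elif run:
--             if k == len(counts) or counts[k] != run:
--                 return False
--             k += 1
--             run = 0
--     if run:
--         if k == len(counts) or counts[k] != run:
--             return False
--         k += 1
--     return k == len(counts)
-- ===== Notes on version B (the rewrite author's own statement) =====
-- stated objective: alternative
-- what changed: B replaces A's build-the-run-list-then-two-phase-compare with a single streaming pass that matches each flushed run against counts[k] immediately (an index into counts plus a pending run length), exiting early on the first mismatch and never materializing the run list.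
import Mathlib
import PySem

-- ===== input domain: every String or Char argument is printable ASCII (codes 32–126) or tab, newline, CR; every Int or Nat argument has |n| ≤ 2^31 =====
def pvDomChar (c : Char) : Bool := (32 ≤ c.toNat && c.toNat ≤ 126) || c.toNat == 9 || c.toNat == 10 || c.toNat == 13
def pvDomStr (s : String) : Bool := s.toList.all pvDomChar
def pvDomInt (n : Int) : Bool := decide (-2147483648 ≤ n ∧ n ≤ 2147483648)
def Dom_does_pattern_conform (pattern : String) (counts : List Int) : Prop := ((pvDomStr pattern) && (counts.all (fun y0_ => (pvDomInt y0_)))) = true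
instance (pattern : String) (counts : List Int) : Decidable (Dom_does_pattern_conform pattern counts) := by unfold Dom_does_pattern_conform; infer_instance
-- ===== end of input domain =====

-- B streams the run lengths against `counts` with an index and early exit instead of
-- building the run list and comparing it afterwards (objective: alternative, same cost).

-- ===== PORT A =====
-- A's final comparison loop: for s_indx, s in enumerate(seqs): if seqs[s_indx] != counts[s_indx]: return False
-- (indices are always in range there, so pyGetD with default 0 is exact)
def pvCmpLoopA (seqs counts : List Int) : List (Int × Int) → Bool
  | [] => true
  | (i, _s) :: rest =>
    if PySem.List.pyGetD seqs i 0 ≠ PySem.List.pyGetD counts i 0 then false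
    else pvCmpLoopA seqs counts rest

def does_pattern_conform (pattern : String) (counts : List Int) : Bool :=
  let st := pattern.toList.foldl
    (fun (st : List Int × Int) l =>
      if l == '.' then (if st.2 > 0 then st.1 ++ [st.2] else st.1, 0)
      else (st.1, st.2 + 1)) ([], 0)
  let seqs := if st.2 ≠ 0 then st.1 ++ [st.2] else st.1
  if seqs.length ≠ counts.length then false
  else pvCmpLoopA seqs counts (PySem.List.enumerate seqs 0)

-- ===== PORT B =====
-- B's single loop; the [] case is Source B's after-loop flush (`if run: …; return k == len(counts)`).
def pvAltLoop (counts : List Int) : List Char → Nat → Int → Bool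
  | [], k, run =>
    if run ≠ 0 then
      if k = counts.length ∨ PySem.List.pyGetD counts (k : Int) 0 ≠ run then false
      else decide (k + 1 = counts.length)
    else decide (k = counts.length)
  | c :: cs, k, run =>
    if c ≠ '.' then pvAltLoop counts cs k (run + 1)
    else if run ≠ 0 then
      if k = counts.length ∨ PySem.List.pyGetD counts (k : Int) 0 ≠ run then false
      else pvAltLoop counts cs (k + 1) 0
    else pvAltLoop counts cs k 0

def does_pattern_conform_alt (pattern : String) (counts : List Int) : Bool :=
  pvAltLoop counts pattern.toList 0 0

-- ===== PRECONDITION & SPEC =====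
def Spec_does_pattern_conform (pattern : String) (counts : List Int) (out : Bool) : Prop := out = does_pattern_conform_alt pattern counts
instance (pattern : String) (counts : List Int) (out : Bool) : Decidable (Spec_does_pattern_conform pattern counts out) := by unfold Spec_does_pattern_conform; infer_instance

-- ===== CLAIM (what is proved, stated in full; the proofs are below) =====
def Claim_equal_does_pattern_conform : Prop := ∀ (pattern : String) (counts : List Int), Dom_does_pattern_conform pattern counts → Spec_does_pattern_conform pattern counts (does_pattern_conform pattern counts)

-- ===== LEMMAS AND PROOFS =====

-- Proof-side specification: the run lengths of `chars` given a pending run of length `run`.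
def pvRuns : Int → List Char → List Int
  | run, [] => if run ≠ 0 then [run] else []
  | run, c :: cs =>
    if c ≠ '.' then pvRuns (run + 1) cs
    else if run ≠ 0 then run :: pvRuns 0 cs
    else pvRuns 0 cs

theorem pvGetD_eq_getElem (xs : List Int) (j : Nat) (h : j < xs.length) :
    PySem.List.pyGetD xs (j : Int) 0 = xs[j] := by
  simp [PySem.List.pyGetD_natCast, h]

theorem pvA_fold (chars : List Char) : ∀ (acc : List Int) (run : Int), 0 ≤ run →
    (let st := chars.foldl
        (fun (st : List Int × Int) l =>
          if l == '.' then (if st.2 > 0 then st.1 ++ [st.2] else st.1, 0)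
          else (st.1, st.2 + 1)) (acc, run)
      if st.2 ≠ 0 then st.1 ++ [st.2] else st.1) = acc ++ pvRuns run chars := by
  induction chars with
  | nil =>
    intro acc run h
    simp only [List.foldl_nil, pvRuns]
    by_cases hr : run = 0 <;> simp [hr]
  | cons c cs ih =>
    intro acc run h
    simp only [List.foldl_cons]
    by_cases hc : c = '.'
    · by_cases hr : run = 0
      · subst hr
        simpa [hc, pvRuns] using ih acc 0 le_rfl
      · have hr' : run > 0 := lt_of_le_of_ne h (Ne.symm hr)
        have := ih (acc ++ [run]) 0 le_rfl
        simp [hc, hr', hr, pvRuns] at this ⊢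
        simpa using this
    · have := ih acc (run + 1) (by omega)
      simpa [hc, pvRuns] using this

theorem pvA_cmp (seqs counts : List Int) (hl : seqs.length = counts.length) :
    ∀ (tail : List Int) (j : Nat), tail = seqs.drop j →
      pvCmpLoopA seqs counts (PySem.List.enumerate tail (j : Int))
        = decide (seqs.drop j = counts.drop j) := by
  intro tail
  induction tail with
  | nil =>
    intro j hj
    have h1 : seqs.length ≤ j := List.drop_eq_nil_iff.mp hj.symm
    have h2 : counts.drop j = [] := List.drop_eq_nil_iff.mpr (by omega)
    simp [PySem.List.enumerate_nil, pvCmpLoopA, ← hj, h2]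
  | cons x t ih =>
    intro j hj
    have hjlt : j < seqs.length := by
      by_contra hge
      rw [List.drop_eq_nil_iff.mpr (by omega)] at hj
      exact List.cons_ne_nil x t hj
    have hjc : j < counts.length := hl ▸ hjlt
    have hdrop : seqs.drop j = seqs[j] :: seqs.drop (j + 1) := List.drop_eq_getElem_cons hjlt
    have hdc : counts.drop j = counts[j] :: counts.drop (j + 1) := List.drop_eq_getElem_cons hjc
    obtain ⟨hx1, hx2⟩ := List.cons_eq_cons.mp (hj.trans hdrop)
    rw [PySem.List.enumerate_cons]
    simp only [pvCmpLoopA, pvGetD_eq_getElem seqs j hjlt, pvGetD_eq_getElem counts j hjc]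
    by_cases heq : seqs[j] = counts[j]
    · have hcast : (j : Int) + 1 = ((j + 1 : Nat) : Int) := by push_cast; ring
      rw [if_neg (by simp [heq]), hcast, ih (j + 1) hx2, decide_eq_decide]
      constructor
      · intro h
        rw [hdrop, hdc, heq, h]
      · intro h
        rw [hdrop, hdc] at h
        exact (List.cons_eq_cons.mp h).2
    · rw [if_pos heq]
      symm; simp only [decide_eq_false_iff_not]
      intro h
      rw [hdrop, hdc] at h
      exact heq (List.cons_eq_cons.mp h).1

theorem pvA_char (pattern : String) (counts : List Int) :
    does_pattern_conform pattern counts = decide (pvRuns 0 pattern.toList = counts) := by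
  have hfold := pvA_fold pattern.toList [] 0 le_rfl
  simp only [List.nil_append] at hfold
  unfold does_pattern_conform
  simp only [hfold]
  by_cases hlen : (pvRuns 0 pattern.toList).length = counts.length
  · rw [if_neg (by simp [hlen])]
    have := pvA_cmp (pvRuns 0 pattern.toList) counts hlen (pvRuns 0 pattern.toList) 0 (by simp)
    simpa using this
  · rw [if_pos (by simpa using hlen)]
    symm; simp only [decide_eq_false_iff_not]
    intro h; exact hlen (congrArg List.length h)

theorem pvB_char (counts : List Int) (chars : List Char) :
    ∀ (k : Nat) (run : Int), k ≤ counts.length →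
      pvAltLoop counts chars k run = decide (counts.drop k = pvRuns run chars) := by
  induction chars with
  | nil =>
    intro k run hk
    simp only [pvAltLoop, pvRuns]
    by_cases hr : run = 0
    · rw [if_neg (by simp [hr]), decide_eq_decide, if_neg (by simp [hr]),
        List.drop_eq_nil_iff]
      omega
    · rw [if_pos hr]
      by_cases hkl : k = counts.length
      · subst hkl
        rw [if_pos (Or.inl rfl)]
        symm; simp only [decide_eq_false_iff_not]
        rw [if_pos hr, List.drop_length]
        simp
      · have hklt : k < counts.length := lt_of_le_of_ne hk hkl
        have hdc : counts.drop k = counts[k] :: counts.drop (k + 1) := List.drop_eq_getElem_cons hklt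
        by_cases hv : counts[k] = run
        · rw [if_neg (by simp [hkl, pvGetD_eq_getElem counts k hklt, hv]),
            decide_eq_decide, if_pos hr, hdc]
          constructor
          · intro h
            rw [hv, List.drop_eq_nil_iff.mpr (by omega)]
          · intro h
            obtain ⟨-, h2⟩ := List.cons_eq_cons.mp h
            have := List.drop_eq_nil_iff.mp h2
            omega
        · rw [if_pos (Or.inr (by simp [pvGetD_eq_getElem counts k hklt, hv]))]
          symm; simp only [decide_eq_false_iff_not]
          rw [if_pos hr, hdc]
          intro h
          exact hv (List.cons_eq_cons.mp h).1
  | cons c cs ih =>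
    intro k run hk
    simp only [pvAltLoop]
    by_cases hc : c = '.'
    · subst hc
      rw [if_neg (by simp)]
      by_cases hr : run = 0
      · rw [if_neg (by simp [hr]), ih k 0 hk]
        simp [pvRuns, hr]
      · rw [if_pos hr]
        by_cases hkl : k = counts.length
        · subst hkl
          rw [if_pos (Or.inl rfl)]
          symm; simp only [decide_eq_false_iff_not]
          rw [List.drop_length]
          simp [pvRuns, hr]
        · have hklt : k < counts.length := lt_of_le_of_ne hk hkl
          have hdc : counts.drop k = counts[k] :: counts.drop (k + 1) := List.drop_eq_getElem_cons hklt
          have hR : pvRuns run ('.' :: cs) = run :: pvRuns 0 cs := by simp [pvRuns, hr]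
          by_cases hv : counts[k] = run
          · rw [if_neg (by simp [hkl, pvGetD_eq_getElem counts k hklt, hv]),
              ih (k + 1) 0 hklt, decide_eq_decide]
            constructor
            · intro h
              rw [hdc, hv, h, hR]
            · intro h
              rw [hdc, hR] at h
              exact (List.cons_eq_cons.mp h).2
          · rw [if_pos (Or.inr (by simp [pvGetD_eq_getElem counts k hklt, hv]))]
            symm; simp only [decide_eq_false_iff_not]
            rw [hdc, hR]
            intro h
            exact hv (List.cons_eq_cons.mp h).1
    · rw [if_pos hc, ih k (run + 1) hk]
      simp [pvRuns, hc]

-- ===== VERDICT (by name: the statement is the Claim_ definition above) =====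
theorem does_pattern_conform_spec : Claim_equal_does_pattern_conform := by
  intro pattern counts _
  unfold Spec_does_pattern_conform does_pattern_conform_alt
  rw [pvA_char, pvB_char counts pattern.toList 0 0 (Nat.zero_le _)]
  simp [eq_comm]
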